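-- pv_equiv track=rewrite | github.com/jakeson99/early_edge | email_job.py | check_content_filters
-- ===== SOURCE A (Python) =====
-- FINANCIAL_PHRASES = [
--     "you should buy",
--     "you should sell",
--     "i recommend investing",
--     "consider purchasing shares",
--     "buy this stock",
--     "sell this stock",
--     "i recommend buying",
--     "i recommend selling",
-- ]
--
-- def check_content_filters(briefing: dict, user: dict) -> list:
--     """Returns list of flag strings. Empty list = all checks passed."""
--     flags = []
--     items = briefing.get('items', [])
--
--     # 1. Financial advice keyword filter
--     for item in items:
--         text = (item.get('summary', '') + ' ' + item.get('why_it_matters', '')).lower()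
--         for phrase in FINANCIAL_PHRASES:
--             if phrase in text:
--                 flags.append(
--                     f"Financial advice phrase in item {item.get('number', '?')}: '{phrase}'"
--                 )
--
--     # 2. Source count — at least 4 distinct named publications
--     sources = {item.get('source', '').strip().lower() for item in items if item.get('source')}
--     if len(sources) < 4:
--         flags.append(f"Only {len(sources)} distinct source(s) cited — minimum is 4")
--
--     # 3. Length sanity check — summary must be 40–200 words
--     for item in items:
--         summary = item.get('summary', '')
--         word_count = len(summary.split())
--         if word_count < 40 or word_count > 200:
--             flags.append(
--                 f"Item {item.get('number', '?')} summary is {word_count} words "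
--                 f"(must be 40–200)"
--             )
--
--     # 4. Personalisation check — goal must appear/be paraphrased in ≥3 of 5 why_it_matters
--     goal = (user.get('primary_goal') or '').lower()
--     if goal:
--         # Use significant words (>4 chars) to check for goal reference
--         goal_words = {w for w in goal.split() if len(w) > 4}
--         personalised_count = 0
--         for item in items:
--             why = item.get('why_it_matters', '').lower()
--             matches = sum(1 for w in goal_words if w in why)
--             if goal_words and matches >= max(2, len(goal_words) // 4):
--                 personalised_count += 1
--         if personalised_count < 3:
--             flags.append(
--                 f"Only {personalised_count}/5 'why it matters' lines reference the "
--                 f"subscriber's goal — minimum is 3"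
--             )
--
--     return flags
-- ===== SOURCE B (Python) =====
-- FINANCIAL_PHRASES = [
--     "you should buy",
--     "you should sell",
--     "i recommend investing",
--     "consider purchasing shares",
--     "buy this stock",
--     "sell this stock",
--     "i recommend buying",
--     "i recommend selling",
-- ]
--
-- def check_content_filters(briefing: dict, user: dict) -> list:
--     """Single pass over items: four independent accumulators, assembled at the end."""
--     items = briefing.get('items', [])
--     goal = (user.get('primary_goal') or '').lower()
--     goal_words = {w for w in goal.split() if len(w) > 4}
--     threshold = max(2, len(goal_words) // 4)
--     fin_flags = []
--     len_flags = []
--     sources = set()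
--     personalised = 0
--     for item in items:
--         num = item.get('number', '?')
--         summary = item.get('summary', '')
--         why = item.get('why_it_matters', '').lower()
--         text = (summary + ' ' + item.get('why_it_matters', '')).lower()
--         fin_flags.extend(
--             f"Financial advice phrase in item {num}: '{p}'"
--             for p in FINANCIAL_PHRASES if p in text
--         )
--         wc = len(summary.split())
--         if wc < 40 or wc > 200:
--             len_flags.append(f"Item {num} summary is {wc} words (must be 40\u2013200)")
--         if item.get('source'):
--             sources.add(item.get('source', '').strip().lower())
--         if goal_words and sum(1 for w in goal_words if w in why) >= threshold:
--             personalised += 1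
--     flags = fin_flags
--     if len(sources) < 4:
--         flags.append(f"Only {len(sources)} distinct source(s) cited \u2014 minimum is 4")
--     flags.extend(len_flags)
--     if goal and personalised < 3:
--         flags.append(
--             f"Only {personalised}/5 'why it matters' lines reference the "
--             f"subscriber's goal \u2014 minimum is 3"
--         )
--     return flags
-- ===== Notes on version B (the rewrite author's own statement) =====
-- stated objective: alternative
-- what changed: A's three separate passes over items (financial-phrase loop, source-set comprehension, length loop) plus the personalisation loop are fused into one pass holding four independent accumulators (two flag lists, a source set, a personalisation counter), with the flag list assembled afterwards in A's order.
import Mathlib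
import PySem

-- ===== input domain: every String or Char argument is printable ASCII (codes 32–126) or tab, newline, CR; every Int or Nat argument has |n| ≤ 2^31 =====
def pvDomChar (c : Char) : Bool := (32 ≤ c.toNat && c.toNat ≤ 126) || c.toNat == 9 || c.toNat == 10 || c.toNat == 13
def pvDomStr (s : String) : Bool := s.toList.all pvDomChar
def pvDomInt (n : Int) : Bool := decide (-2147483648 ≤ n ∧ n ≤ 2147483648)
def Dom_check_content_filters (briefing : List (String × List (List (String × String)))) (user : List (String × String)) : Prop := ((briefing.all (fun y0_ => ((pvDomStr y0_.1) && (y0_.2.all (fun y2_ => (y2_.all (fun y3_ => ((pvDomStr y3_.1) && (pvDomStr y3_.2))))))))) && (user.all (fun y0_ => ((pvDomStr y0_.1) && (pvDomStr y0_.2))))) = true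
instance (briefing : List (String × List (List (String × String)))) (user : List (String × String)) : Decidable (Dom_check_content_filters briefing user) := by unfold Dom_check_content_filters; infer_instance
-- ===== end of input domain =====

-- B fuses A's three passes over `items` into ONE loop with four independent accumulators
-- (financial flags, length flags, source set, personalisation count), assembled afterwards
-- in A's flag order; objective: alternative (single pass), same asymptotic cost.

-- shared literal pieces (the module constant and the f-string texts, used verbatim by both ports)
def FINANCIAL_PHRASES : List String :=
  ["you should buy", "you should sell", "i recommend investing", "consider purchasing shares",
   "buy this stock", "sell this stock", "i recommend buying", "i recommend selling"]

def finFlag (num p : String) : String :=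
  PySem.Str.join "" ["Financial advice phrase in item ", num, ": '", p, "'"]
def lenFlag (num : String) (wc : Nat) : String :=
  PySem.Str.join "" ["Item ", num, " summary is ", PySem.Int.toStr (wc : Int), " words (must be 40–200)"]
def srcFlag (n : Nat) : String :=
  PySem.Str.join "" ["Only ", PySem.Int.toStr (n : Int), " distinct source(s) cited — minimum is 4"]
def persFlag (k : Nat) : String :=
  PySem.Str.join "" ["Only ", PySem.Int.toStr (k : Int), "/5 'why it matters' lines reference the subscriber's goal — minimum is 3"]

-- ===== PORT A =====
def check_content_filters (briefing : List (String × List (List (String × String)))) (user : List (String × String)) : List String :=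
  let items := (PySem.Dict.mk briefing).getD "items" []
  -- 1. financial advice keyword filter
  let flags1 := items.foldl (fun flags item =>
    let text := PySem.Str.lower (PySem.Str.join "" [(PySem.Dict.mk item).getD "summary" "", " ", (PySem.Dict.mk item).getD "why_it_matters" ""])
    FINANCIAL_PHRASES.foldl (fun fl p =>
      if PySem.Str.isIn p text then fl ++ [finFlag ((PySem.Dict.mk item).getD "number" "?") p] else fl) flags) []
  -- 2. distinct sources (set comprehension with a truthiness filter)
  let sources := PySem.Set.ofList ((items.filter (fun item => (PySem.Dict.mk item).getD "source" "" != "")).map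
    (fun item => PySem.Str.lower (PySem.Str.strip ((PySem.Dict.mk item).getD "source" ""))))
  let flags2 := if sources.length < 4 then flags1 ++ [srcFlag sources.length] else flags1
  -- 3. summary length check
  let flags3 := items.foldl (fun fl item =>
    let wc := (PySem.Str.split₀ ((PySem.Dict.mk item).getD "summary" "")).length
    if wc < 40 ∨ 200 < wc then fl ++ [lenFlag ((PySem.Dict.mk item).getD "number" "?") wc] else fl) flags2
  -- 4. personalisation check
  let goal := PySem.Str.lower ((PySem.Dict.mk user).getD "primary_goal" "")
  if goal ≠ "" then
    let goal_words := PySem.Set.ofList ((PySem.Str.split₀ goal).filter (fun w => 4 < PySem.Str.len w))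
    let personalised := items.foldl (fun n item =>
      let why := PySem.Str.lower ((PySem.Dict.mk item).getD "why_it_matters" "")
      let matched := goal_words.foldl (fun m w => if PySem.Str.isIn w why then m + 1 else m) 0
      if goal_words ≠ [] ∧ max 2 (goal_words.length / 4) ≤ matched then n + 1 else n) 0
    if personalised < 3 then flags3 ++ [persFlag personalised] else flags3
  else flags3

-- ===== PORT B =====
def check_content_filters_alt (briefing : List (String × List (List (String × String)))) (user : List (String × String)) : List String :=
  let items := (PySem.Dict.mk briefing).getD "items" []
  let goal := PySem.Str.lower ((PySem.Dict.mk user).getD "primary_goal" "")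
  let goal_words := PySem.Set.ofList ((PySem.Str.split₀ goal).filter (fun w => 4 < PySem.Str.len w))
  let threshold := max 2 (goal_words.length / 4)
  -- single pass: four independent accumulators
  let st := items.foldl (fun st item =>
    let num := (PySem.Dict.mk item).getD "number" "?"
    let summary := (PySem.Dict.mk item).getD "summary" ""
    let why := PySem.Str.lower ((PySem.Dict.mk item).getD "why_it_matters" "")
    let text := PySem.Str.lower (PySem.Str.join "" [summary, " ", (PySem.Dict.mk item).getD "why_it_matters" ""])
    let wc := (PySem.Str.split₀ summary).length
    (st.1 ++ (FINANCIAL_PHRASES.filter (fun p => PySem.Str.isIn p text)).map (finFlag num),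
     (if wc < 40 ∨ 200 < wc then st.2.1 ++ [lenFlag num wc] else st.2.1),
     (if (PySem.Dict.mk item).getD "source" "" != "" then
        PySem.Set.add st.2.2.1 (PySem.Str.lower (PySem.Str.strip ((PySem.Dict.mk item).getD "source" ""))) else st.2.2.1),
     (if goal_words ≠ [] ∧ threshold ≤ goal_words.foldl (fun m w => if PySem.Str.isIn w why then m + 1 else m) 0
      then st.2.2.2 + 1 else st.2.2.2))) (([] : List String), ([] : List String), ([] : List String), (0 : Nat))
  -- assemble in A's flag order
  st.1 ++ (if st.2.2.1.length < 4 then [srcFlag st.2.2.1.length] else [])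
       ++ st.2.1
       ++ (if goal ≠ "" ∧ st.2.2.2 < 3 then [persFlag st.2.2.2] else [])

-- ===== PRECONDITION & SPEC =====
def Spec_check_content_filters (briefing : List (String × List (List (String × String)))) (user : List (String × String)) (out : List String) : Prop := out = check_content_filters_alt briefing user
instance (briefing : List (String × List (List (String × String)))) (user : List (String × String)) (out : List String) : Decidable (Spec_check_content_filters briefing user out) := by unfold Spec_check_content_filters; infer_instance

-- ===== CLAIM (what is proved, stated in full; the proofs are below) =====
def Claim_equal_check_content_filters : Prop := ∀ (briefing : List (String × List (List (String × String)))) (user : List (String × String)), Dom_check_content_filters briefing user → Spec_check_content_filters briefing user (check_content_filters briefing user)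

-- ===== LEMMAS AND PROOFS =====

-- a fold with four independent accumulators is the tuple of the four folds
theorem foldl_quad {α β γ δ ε : Type} (f : α → ε → α) (g : β → ε → β) (h : γ → ε → γ) (k : δ → ε → δ)
    (l : List ε) (a : α) (b : β) (c : γ) (d : δ) :
    l.foldl (fun s e => (f s.1 e, g s.2.1 e, h s.2.2.1 e, k s.2.2.2 e)) (a, b, c, d)
      = (l.foldl f a, l.foldl g b, l.foldl h c, l.foldl k d) := by
  induction l generalizing a b c d with
  | nil => rfl
  | cons x xs ih => simpa using ih (f a x) (g b x) (h c x) (k d x)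

-- the conditional Set.add loop builds exactly the set comprehension
theorem foldl_add_filter_map {ε : Type} (q : ε → Bool) (h : ε → String) (l : List ε) :
    l.foldl (fun s e => if q e then PySem.Set.add s (h e) else s) ([] : List String)
      = PySem.Set.ofList ((l.filter q).map h) := by
  rw [PySem.List.foldl_if_eq_foldl_filter, ← PySem.Set.update_map_eq_foldl_add,
      PySem.Set.update_nil_left]

-- A's nested phrase loop per item equals B's filter-and-map append
theorem foldl_nested_fin {ε : Type} (text num : ε → String) (l : List ε) (init : List String) :
    l.foldl (fun flags item => FINANCIAL_PHRASES.foldl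
        (fun fl p => if PySem.Str.isIn p (text item) then fl ++ [finFlag (num item) p] else fl) flags) init
      = l.foldl (fun flags item =>
          flags ++ (FINANCIAL_PHRASES.filter (fun p => PySem.Str.isIn p (text item))).map (finFlag (num item))) init := by
  induction l generalizing init with
  | nil => rfl
  | cons x xs ih =>
    simp only [List.foldl_cons]
    rw [ih, PySem.List.foldl_append_if]

-- ===== VERDICT (by name: the statement is the Claim_ definition above) =====
theorem check_content_filters_spec : Claim_equal_check_content_filters := by
  intro briefing user _
  unfold Spec_check_content_filters check_content_filters check_content_filters_alt
  simp only []
  rw [foldl_quad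
    (f := fun flags item =>
      flags ++ (FINANCIAL_PHRASES.filter (fun p => PySem.Str.isIn p
        (PySem.Str.lower (PySem.Str.join "" [(PySem.Dict.mk item).getD "summary" "", " ", (PySem.Dict.mk item).getD "why_it_matters" ""])))).map
        (finFlag ((PySem.Dict.mk item).getD "number" "?")))
    (g := fun fl item =>
      if (PySem.Str.split₀ ((PySem.Dict.mk item).getD "summary" "")).length < 40 ∨ 200 < (PySem.Str.split₀ ((PySem.Dict.mk item).getD "summary" "")).length
      then fl ++ [lenFlag ((PySem.Dict.mk item).getD "number" "?") ((PySem.Str.split₀ ((PySem.Dict.mk item).getD "summary" "")).length)] else fl)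
    (h := fun s item =>
      if (PySem.Dict.mk item).getD "source" "" != "" then
        PySem.Set.add s (PySem.Str.lower (PySem.Str.strip ((PySem.Dict.mk item).getD "source" ""))) else s)
    (k := fun n item =>
      if (PySem.Set.ofList ((PySem.Str.split₀ (PySem.Str.lower ((PySem.Dict.mk user).getD "primary_goal" ""))).filter (fun w => 4 < PySem.Str.len w))) ≠ [] ∧
         max 2 ((PySem.Set.ofList ((PySem.Str.split₀ (PySem.Str.lower ((PySem.Dict.mk user).getD "primary_goal" ""))).filter (fun w => 4 < PySem.Str.len w))).length / 4) ≤
           (PySem.Set.ofList ((PySem.Str.split₀ (PySem.Str.lower ((PySem.Dict.mk user).getD "primary_goal" ""))).filter (fun w => 4 < PySem.Str.len w))).foldl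
             (fun m w => if PySem.Str.isIn w (PySem.Str.lower ((PySem.Dict.mk item).getD "why_it_matters" "")) then m + 1 else m) 0
      then n + 1 else n)]
  rw [foldl_add_filter_map, foldl_nested_fin]
  simp only [PySem.List.foldl_append_ite]
  simp only [ite_and]
  split_ifs <;> simp [List.append_assoc]
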